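-- pv_equiv track=rewrite | github.com/linhdvu14/cp-sols | sols/CodeForces/1811_d3/E_Living_Sequence.py | solve
-- ===== SOURCE A (Python) =====
-- MAP = [0, 1, 2, 3, 5, 6, 7, 8, 9]
--
-- def solve(k):
--     digits = []
--     while k:
--         k, d = divmod(k, 9)
--         digits.append(MAP[d])
--     digits.reverse()
--     res = ''.join(map(str, digits))
--     return res
-- ===== SOURCE B (Python) =====
-- DIGITS = '012356789'
--
-- def solve(k):
--     if k == 0:
--         return ''
--     # find the highest power of 9 not exceeding k, then emit digits
--     # most-significant-first; no digit list reversal, no divmod chain upward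
--     p = 1
--     while p * 9 <= k:
--         p *= 9
--     out = []
--     while p:
--         out.append(DIGITS[k // p])
--         k %= p
--         p //= 9
--     return ''.join(out)
-- ===== Notes on version B (the rewrite author's own statement) =====
-- stated objective: alternative
-- what changed: Instead of collecting base-9 digits least-significant-first into a list, reversing and joining through a MAP table, B first finds the highest power of 9 not exceeding k and then extracts digits most-significant-first by division/remainder against descending powers, indexing into a digit string.
import Mathlib
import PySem

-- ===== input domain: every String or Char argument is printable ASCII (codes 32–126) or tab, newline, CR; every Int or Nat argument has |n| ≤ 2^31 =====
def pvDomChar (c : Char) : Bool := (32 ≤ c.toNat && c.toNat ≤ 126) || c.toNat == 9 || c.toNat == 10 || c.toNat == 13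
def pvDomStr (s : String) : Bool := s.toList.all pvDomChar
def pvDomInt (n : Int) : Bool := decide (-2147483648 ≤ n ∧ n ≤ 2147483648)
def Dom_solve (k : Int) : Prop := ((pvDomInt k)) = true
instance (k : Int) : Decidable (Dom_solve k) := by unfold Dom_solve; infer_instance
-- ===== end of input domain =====

-- B finds the highest power of 9 ≤ k and emits digits most-significant-first
-- against descending powers (digit-string indexing), instead of A's
-- least-significant-first digit list + reverse + join; objective: alternative.


-- ===== PORT A =====
def pvMAP : List Int := [0, 1, 2, 3, 5, 6, 7, 8, 9]

-- the 'while k:' loop; fuel only makes it total (the loop terminates exactly on 0 ≤ k, which Pre_ states)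
def solveLoop : Nat → Int → List Int → List Int
  | 0, _, digits => digits
  | fuel + 1, k, digits =>
    if k = 0 then digits
    else
      solveLoop fuel (PySem.Int.floordiv k 9)
        (digits ++ [PySem.List.pyGetD pvMAP (PySem.Int.mod k 9) 0])

def solve (k : Int) : String :=
  let digits := (solveLoop (k.natAbs + 1) k []).reverse
  PySem.Str.join "" (digits.map PySem.Int.toStr)

-- ===== PORT B =====
def pvDIGITS : List Char := ['0', '1', '2', '3', '5', '6', '7', '8', '9']

-- 'while p * 9 <= k: p *= 9'; fuel only makes it total
def powLoop : Nat → Int → Int → Int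
  | 0, p, _ => p
  | fuel + 1, p, k => if p * 9 ≤ k then powLoop fuel (p * 9) k else p

-- 'while p: out.append(DIGITS[k // p]); k %= p; p //= 9'; fuel only makes it total.
-- DIGITS[k // p]: on Pre_ the index is provably 0 ≤ k//p ≤ 8, so pyGetD's default is never used.
def emitLoop : Nat → Int → Int → List Char → List Char
  | 0, _, _, out => out
  | fuel + 1, p, k, out =>
    if p = 0 then out
    else
      emitLoop fuel (PySem.Int.floordiv p 9) (PySem.Int.mod k p)
        (out ++ [PySem.List.pyGetD pvDIGITS (PySem.Int.floordiv k p) ' '])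

def solve_alt (k : Int) : String :=
  if k = 0 then ""
  else
    let p := powLoop (k.natAbs + 1) 1 k
    String.ofList (emitLoop (k.natAbs + 2) p k [])

-- ===== PRECONDITION & SPEC =====
-- Pre_ excludes negative k, on which Python A loops forever (the quotient never reaches zero).
def Pre_solve (k : Int) : Prop := 0 ≤ k
instance (k : Int) : Decidable (Pre_solve k) := by unfold Pre_solve; infer_instance
def pvWitness_solve : Int := (5)

def Spec_solve (k : Int) (out : String) : Prop := out = solve_alt k
instance (k : Int) (out : String) : Decidable (Spec_solve k out) := by unfold Spec_solve; infer_instance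

-- ===== CLAIM (what is proved, stated in full; the proofs are below) =====
def Claim_equal_solve : Prop := ∀ (k : Int), Dom_solve k → Pre_solve k → Spec_solve k (solve k)

-- ===== LEMMAS AND PROOFS =====

-- the character a digit 0 ≤ d ≤ 8 is rendered to
def cOf (d : Nat) : Char := pvDIGITS.getD d ' '

-- the common mathematical value: base-9 digits of n, most significant first, remapped
def R (n : Nat) : List Char := ((Nat.digits 9 n).map cOf).reverse

theorem R_zero : R 0 = [] := by simp [R]

theorem R_succ (n : Nat) (hn : n ≠ 0) : R n = R (n / 9) ++ [cOf (n % 9)] := by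
  unfold R
  rw [Nat.digits_def' (by norm_num : 1 < 9) (Nat.pos_of_ne_zero hn)]
  simp

-- ---- A side ----

-- rendering A's digit list to characters, as A's reverse-then-join does
def pvRender (ds : List Int) : List Char :=
  (ds.reverse.map PySem.Int.toChars).flatten

theorem pvRender_append_singleton (ds : List Int) (m : Int) :
    pvRender (ds ++ [m]) = PySem.Int.toChars m ++ pvRender ds := by
  simp [pvRender]

theorem digitChar (r : Nat) (h : r < 9) :
    PySem.Int.toChars (pvMAP.getD r 0) = [cOf r] := by
  interval_cases r <;> decide

theorem join_empty_sep (parts : List (List Char)) :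
    PySem.Chars.join [] parts = parts.flatten := by
  match parts with
  | [] => simp [PySem.Chars.join_nil]
  | [p] => simp [PySem.Chars.join_singleton]
  | p :: q :: rest =>
      rw [PySem.Chars.join_cons_cons, join_empty_sep (q :: rest)]
      simp

theorem loopA (n : Nat) : ∀ (f : Nat) (acc : List Int), n < f →
    pvRender (solveLoop f (n : Int) acc) = R n ++ pvRender acc := by
  induction n using Nat.strong_induction_on with
  | _ n ih =>
    intro f acc hf
    match f with
    | g + 1 =>
      by_cases hn : n = 0
      · subst hn; simp [solveLoop, R_zero]
      · have hne : ((n : Int)) ≠ 0 := by exact_mod_cast hn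
        have hq : PySem.Int.floordiv (n : Int) 9 = ((n / 9 : Nat) : Int) := by
          exact_mod_cast PySem.Int.floordiv_natCast n 9
        have hm : PySem.Int.mod (n : Int) 9 = ((n % 9 : Nat) : Int) := by
          exact_mod_cast PySem.Int.mod_natCast n 9
        have hdiv : n / 9 < n := Nat.div_lt_self (Nat.pos_of_ne_zero hn) (by omega)
        simp only [solveLoop, if_neg hne, hq, hm, PySem.List.pyGetD_natCast]
        rw [ih (n / 9) hdiv g _ (by omega), pvRender_append_singleton,
          digitChar (n % 9) (Nat.mod_lt _ (by omega)), R_succ n hn]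
        simp

theorem map_toList_toStr (ds : List Int) :
    List.map (String.toList ∘ PySem.Int.toStr) ds = List.map PySem.Int.toChars ds := by
  simp [Function.comp_def, PySem.Int.toList_toStr]

theorem solve_chars (n : Nat) : (solve (n : Int)).toList = R n := by
  simp only [solve, PySem.Str.toList_join, List.map_map, map_toList_toStr]
  rw [show ("" : String).toList = [] from rfl, join_empty_sep]
  have hl := loopA n ((n : Int).natAbs + 1) [] (by simp)
  unfold pvRender at hl
  simpa using hl

-- ---- B side ----

-- padded digit extraction against descending powers, as B's second loop performs
def padded : Nat → Nat → List Char
  | 0, n => [cOf n]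
  | m + 1, n => cOf (n / 9 ^ (m + 1)) :: padded m (n % 9 ^ (m + 1))

theorem pad_peel (m : Nat) : ∀ n : Nat, padded (m + 1) n = padded m (n / 9) ++ [cOf (n % 9)] := by
  induction m with
  | zero => intro n; simp [padded, pow_one]
  | succ m ih =>
      intro n
      have h1 : n / 9 ^ (m + 2) = (n / 9) / 9 ^ (m + 1) := by
        rw [Nat.div_div_eq_div_mul, ← pow_succ']
      have h2 : (n % 9 ^ (m + 2)) / 9 = (n / 9) % 9 ^ (m + 1) := by
        have : (9 : Nat) ^ (m + 2) = 9 * 9 ^ (m + 1) := by ring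
        rw [this, Nat.mod_mul_right_div_self]
      have h3 : (n % 9 ^ (m + 2)) % 9 = n % 9 :=
        Nat.mod_mod_of_dvd n ⟨9 ^ (m + 1), by ring⟩
      show cOf (n / 9 ^ (m + 2)) :: padded (m + 1) (n % 9 ^ (m + 2)) = _
      rw [ih (n % 9 ^ (m + 2)), h1, h2, h3]
      rfl

theorem padded_eq_R (m : Nat) : ∀ n : Nat, 9 ^ m ≤ n → n < 9 ^ (m + 1) → padded m n = R n := by
  induction m with
  | zero =>
      intro n h1 h2
      have hn : n ≠ 0 := by simpa using Nat.one_le_iff_ne_zero.mp (by simpa using h1)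
      rw [R_succ n hn, show n / 9 = 0 from Nat.div_eq_of_lt (by simpa using h2), R_zero,
        Nat.mod_eq_of_lt (by simpa using h2)]
      rfl
  | succ m ih =>
      intro n h1 h2
      have hn : n ≠ 0 := by have h : 0 < 9 ^ (m + 1) := Nat.pow_pos (by omega); omega
      rw [pad_peel, R_succ n hn]
      congr 1
      apply ih
      · rw [Nat.le_div_iff_mul_le (by omega)]
        calc 9 ^ m * 9 = 9 ^ (m + 1) := by ring
          _ ≤ n := h1
      · rw [Nat.div_lt_iff_lt_mul (by omega)]
        calc n < 9 ^ (m + 2) := h2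
          _ = 9 ^ (m + 1) * 9 := by ring

theorem powInv : ∀ (f a n : Nat), 0 < n → 9 ^ a ≤ n → Nat.log 9 n - a < f →
    powLoop f ((9 ^ a : Nat) : Int) (n : Int) = ((9 ^ Nat.log 9 n : Nat) : Int) := by
  intro f
  induction f with
  | zero => intro a n _ _ hf; omega
  | succ f ih =>
      intro a n hn ha hf
      have hcast : ((9 ^ a : Nat) : Int) * 9 = ((9 ^ (a + 1) : Nat) : Int) := by
        push_cast [pow_succ]; ring
      simp only [powLoop, hcast, Nat.cast_le]
      by_cases h : 9 ^ (a + 1) ≤ n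
      · rw [if_pos h]
        have hlog : a + 1 ≤ Nat.log 9 n := Nat.le_log_of_pow_le (by norm_num) h
        exact ih (a + 1) n hn h (by omega)
      · rw [if_neg h]
        rw [Nat.log_eq_of_pow_le_of_lt_pow ha (by omega)]

theorem emit_zero (g : Nat) (k : Int) (out : List Char) : emitLoop g 0 k out = out := by
  cases g <;> simp [emitLoop]

theorem emitInv (m : Nat) : ∀ (f n : Nat) (out : List Char), m < f → n < 9 ^ (m + 1) →
    emitLoop f ((9 ^ m : Nat) : Int) (n : Int) out = out ++ padded m n := by
  induction m with
  | zero =>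
      intro f n out hf _
      match f, hf with
      | g + 1, _ =>
        have h1 : ((9 ^ 0 : Nat) : Int) = 1 := by norm_num
        have hd : PySem.Int.floordiv (n : Int) 1 = ((n / 1 : Nat) : Int) := by
          exact_mod_cast PySem.Int.floordiv_natCast n 1
        simp only [emitLoop, h1, if_neg (by norm_num : (1 : Int) ≠ 0), hd]
        rw [show PySem.Int.floordiv 1 9 = 0 from rfl,
          show PySem.Int.mod (n : Int) 1 = ((n % 1 : Nat) : Int) by
            exact_mod_cast PySem.Int.mod_natCast n 1]
        simp [emit_zero, padded, cOf]
  | succ m ih =>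
      intro f n out hf hn
      match f, hf with
      | g + 1, hf =>
        have hp : ((9 ^ (m + 1) : Nat) : Int) ≠ 0 := by
          exact_mod_cast (Nat.pow_pos (by omega : (0:Nat) < 9) : 0 < 9 ^ (m+1)).ne'
        have hdp : PySem.Int.floordiv ((9 ^ (m + 1) : Nat) : Int) 9 = ((9 ^ m : Nat) : Int) := by
          have : PySem.Int.floordiv ((9 ^ (m + 1) : Nat) : Int) ((9 : Nat) : Int)
              = ((9 ^ (m + 1) / 9 : Nat) : Int) := PySem.Int.floordiv_natCast _ 9
          rw [show ((9 : Nat) : Int) = 9 from rfl] at this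
          rw [this]
          congr 1
          rw [pow_succ, Nat.mul_div_cancel _ (by omega)]
        have hmod : PySem.Int.mod (n : Int) ((9 ^ (m + 1) : Nat) : Int)
            = ((n % 9 ^ (m + 1) : Nat) : Int) := PySem.Int.mod_natCast n _
        have hdk : PySem.Int.floordiv (n : Int) ((9 ^ (m + 1) : Nat) : Int)
            = ((n / 9 ^ (m + 1) : Nat) : Int) := PySem.Int.floordiv_natCast n _
        simp only [emitLoop, if_neg hp, hdp, hmod, hdk, PySem.List.pyGetD_natCast]
        rw [ih g (n % 9 ^ (m + 1)) _ (by omega) (Nat.mod_lt _ (by positivity))]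
        show _ = out ++ (cOf (n / 9 ^ (m + 1)) :: padded m (n % 9 ^ (m + 1)))
        simp [cOf]

theorem solve_alt_chars (n : Nat) (hn : n ≠ 0) : solve_alt (n : Int) = String.ofList (R n) := by
  have hne : ((n : Int)) ≠ 0 := by exact_mod_cast hn
  have hnab : ((n : Int)).natAbs = n := Int.natAbs_natCast n
  have hpow : powLoop ((n : Int).natAbs + 1) 1 (n : Int) = ((9 ^ Nat.log 9 n : Nat) : Int) := by
    have := powInv ((n : Int).natAbs + 1) 0 n (Nat.pos_of_ne_zero hn) (by simpa using Nat.one_le_iff_ne_zero.mpr hn)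
      (by rw [hnab]; have := Nat.log_le_self 9 n; omega)
    simpa using this
  have hemit := emitInv (Nat.log 9 n) ((n : Int).natAbs + 2) n []
    (by rw [hnab]; have := Nat.log_le_self 9 n; omega)
    (Nat.lt_pow_succ_log_self (by norm_num) n)
  rw [solve_alt, if_neg hne]
  simp only [hpow, hemit, List.nil_append]
  rw [padded_eq_R (Nat.log 9 n) n (Nat.pow_log_le_self 9 hn)
    (Nat.lt_pow_succ_log_self (by norm_num) n)]

theorem solve_eq_alt (n : Nat) : solve (n : Int) = solve_alt (n : Int) := by
  by_cases hn : n = 0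
  · subst hn; decide
  · rw [solve_alt_chars n hn]
    calc solve (n : Int) = String.ofList (solve (n : Int)).toList := by simp
      _ = String.ofList (R n) := by rw [solve_chars]

-- ===== VERDICT (by name: the statement is the Claim_ definition above) =====
theorem solve_spec : Claim_equal_solve := by
  intro k _ hpre
  unfold Spec_solve
  obtain ⟨n, rfl⟩ := Int.eq_ofNat_of_zero_le hpre
  exact solve_eq_alt n
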